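-- pv_equiv track=rewrite | github.com/tydeptrai21042004/Temp_run_all | pdeopt/pde/apply.py | _infer_rect_hw
-- ===== SOURCE A (Python) =====
-- import math
-- from typing import Optional, Tuple
--
-- def _infer_rect_hw(in_features: int, min_side: int = 8) -> Optional[Tuple[int, int]]:
--     """
--     Find a near-square factorization H*W=in_features with H,W >= min_side,
--     minimizing |H-W|. Useful for Linear layers like 512 -> 16x32.
--
--     NOTE: This is heuristic. For deep nets, prefer explicit linear_hw for "real geometry".
--     """
--     n = int(in_features)
--     best = None
--     best_gap = 10**18
--     r = int(math.isqrt(n))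
--     for h in range(1, r + 1):
--         if n % h != 0:
--             continue
--         w = n // h
--         if h < min_side or w < min_side:
--             continue
--         gap = abs(h - w)
--         if gap < best_gap:
--             best_gap = gap
--             best = (h, w)
--     return best
-- ===== SOURCE B (Python) =====
-- import math
-- from typing import Optional, Tuple
--
-- def _infer_rect_hw(in_features: int, min_side: int = 8) -> Optional[Tuple[int, int]]:
--     """Find a near-square factorization H*W=in_features with H,W >= min_side.
--
--     Scans h downward from isqrt(n): the first divisor found gives the
--     minimal |H-W|, so no best/best_gap bookkeeping is needed.
--     """
--     n = int(in_features)
--     r = math.isqrt(n)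
--     lo = max(min_side, 1)
--     for h in range(r, lo - 1, -1):
--         if n % h == 0:
--             w = n // h
--             if w >= min_side:
--                 return (h, w)
--     return None
-- ===== Notes on version B (the rewrite author's own statement) =====
-- stated objective: simpler
-- what changed: B scans candidate heights downward from isqrt(n) and returns at the first divisor whose co-factor is >= min_side (the largest h <= sqrt(n) minimizes |H-W|), eliminating A's best/best_gap accumulator and its full upward scan.
import Mathlib
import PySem

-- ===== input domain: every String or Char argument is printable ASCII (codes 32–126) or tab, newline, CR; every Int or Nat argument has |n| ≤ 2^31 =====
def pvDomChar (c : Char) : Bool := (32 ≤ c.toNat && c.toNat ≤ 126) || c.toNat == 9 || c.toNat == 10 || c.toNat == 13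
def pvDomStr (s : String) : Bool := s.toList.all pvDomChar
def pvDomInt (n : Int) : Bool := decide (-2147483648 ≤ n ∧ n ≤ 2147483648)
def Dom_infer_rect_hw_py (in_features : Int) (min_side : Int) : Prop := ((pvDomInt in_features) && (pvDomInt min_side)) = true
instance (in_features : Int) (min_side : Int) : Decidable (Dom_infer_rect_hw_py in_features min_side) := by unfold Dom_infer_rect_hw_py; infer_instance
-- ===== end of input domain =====

-- B scans h downward from isqrt(n) and returns at the FIRST divisor with n//h >= min_side
-- (the largest h <= sqrt(n) minimizes |h - n//h|), so A's best/best_gap accumulator disappears.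

-- ===== PORT A =====
-- loop body of A: state = (best, best_gap)
def pvStepA (n ms : Int) (st : Option (Int × Int) × Int) (h : Int) : Option (Int × Int) × Int :=
  if PySem.Int.mod n h ≠ 0 then st
  else
    let w := PySem.Int.floordiv n h
    if h < ms ∨ w < ms then st
    else
      let gap := |h - w|
      if gap < st.2 then (some (h, w), gap) else st

def infer_rect_hw_py (in_features : Int) (min_side : Int) : Option (Int × Int) :=
  let n := in_features
  let r : Int := (Nat.sqrt n.toNat : Int)   -- int(math.isqrt(n)); n ≥ 0 by Pre_
  ((PySem.List.pyRange 1 (r + 1) 1).foldl (pvStepA n min_side) (none, 10 ^ 18)).1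

-- ===== PORT B =====
-- loop body of B: early return becomes findSome?
def pvCheckB (n ms : Int) (h : Int) : Option (Int × Int) :=
  if PySem.Int.mod n h = 0 then
    let w := PySem.Int.floordiv n h
    if ms ≤ w then some (h, w) else none
  else none

def infer_rect_hw_py_alt (in_features : Int) (min_side : Int) : Option (Int × Int) :=
  let n := in_features
  let r : Int := (Nat.sqrt n.toNat : Int)   -- math.isqrt(n); n ≥ 0 by Pre_
  let lo := max min_side 1
  (PySem.List.pyRange r (lo - 1) (-1)).findSome? (pvCheckB n min_side)

-- ===== PRECONDITION & SPEC =====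
-- math.isqrt raises ValueError on negative input; Pre_ excludes exactly in_features < 0.
def Pre_infer_rect_hw_py (in_features : Int) (min_side : Int) : Prop := 0 ≤ in_features
instance (in_features : Int) (min_side : Int) : Decidable (Pre_infer_rect_hw_py in_features min_side) := by unfold Pre_infer_rect_hw_py; infer_instance
def pvWitness_infer_rect_hw_py : Int × Int := (512, 8)

def Spec_infer_rect_hw_py (in_features : Int) (min_side : Int) (out : Option (Int × Int)) : Prop := out = infer_rect_hw_py_alt in_features min_side
instance (in_features : Int) (min_side : Int) (out : Option (Int × Int)) : Decidable (Spec_infer_rect_hw_py in_features min_side out) := by unfold Spec_infer_rect_hw_py; infer_instance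

-- ===== CLAIM (what is proved, stated in full; the proofs are below) =====
def Claim_equal_infer_rect_hw_py : Prop := ∀ (in_features : Int) (min_side : Int), Dom_infer_rect_hw_py in_features min_side → Pre_infer_rect_hw_py in_features min_side → Spec_infer_rect_hw_py in_features min_side (infer_rect_hw_py in_features min_side)

-- ===== LEMMAS AND PROOFS =====

-- a divisor h is "valid" when A's inner filters keep it
def pvValid (n ms h : Int) : Prop := 1 ≤ h ∧ h ∣ n ∧ ms ≤ h ∧ ms ≤ PySem.Int.floordiv n h

def pvGapOf (o : Option (Int × Int)) : Int :=
  match o with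
  | some (h, w) => |h - w|
  | none => 10 ^ 18

-- joint invariant: after A has scanned 1..m and B would scan m..lo, A's state mirrors
-- B's answer, B's answer is the largest valid divisor ≤ m, and gaps are recorded faithfully.
lemma pvMain (n ms : Int) (hn : 0 ≤ n) (hbig : n ≤ 2147483648) (m : Nat)
    (hm : (m : Int) * (m : Int) ≤ n) :
    (((PySem.List.pyRange 1 ((m : Int) + 1) 1).foldl (pvStepA n ms) (none, 10 ^ 18)).1
        = (PySem.List.pyRange (m : Int) (max ms 1 - 1) (-1)).findSome? (pvCheckB n ms))
    ∧ (((PySem.List.pyRange 1 ((m : Int) + 1) 1).foldl (pvStepA n ms) (none, 10 ^ 18)).2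
        = pvGapOf ((PySem.List.pyRange (m : Int) (max ms 1 - 1) (-1)).findSome? (pvCheckB n ms)))
    ∧ (∀ h w, (PySem.List.pyRange (m : Int) (max ms 1 - 1) (-1)).findSome? (pvCheckB n ms) = some (h, w) →
        pvValid n ms h ∧ w = PySem.Int.floordiv n h ∧ h ≤ (m : Int))
    ∧ ((PySem.List.pyRange (m : Int) (max ms 1 - 1) (-1)).findSome? (pvCheckB n ms) = none →
        ∀ h', pvValid n ms h' → ¬ (h' ≤ (m : Int))) := by
  induction m with
  | zero =>
    simp only [Nat.cast_zero, zero_add]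
    rw [PySem.List.pyRange_one_eq_nil (le_refl 1),
        PySem.List.pyRange_neg_one_eq_nil (by omega : (0:Int) ≤ max ms 1 - 1)]
    refine ⟨rfl, rfl, by simp, ?_⟩
    intro _ h' hv
    have h1 := hv.1
    omega
  | succ m ih =>
    have hcast : (((m + 1 : Nat)) : Int) = (m : Int) + 1 := by push_cast; ring
    have hmnn : (0:Int) ≤ (m : Int) := Int.natCast_nonneg m
    have hm' : (m : Int) * (m : Int) ≤ n := by
      rw [hcast] at hm; nlinarith
    obtain ⟨ih1, ih2, ih3, ih4⟩ := ih hm'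
    rw [hcast] at hm ⊢
    rw [PySem.List.pyRange_one_succ_right (by omega : (1:Int) ≤ (m:Int)+1), List.foldl_append,
        List.foldl_cons, List.foldl_nil]
    set F := (PySem.List.pyRange 1 ((m : Int) + 1) 1).foldl (pvStepA n ms) (none, 10 ^ 18) with hF
    by_cases hrange : max ms 1 - 1 < (m : Int) + 1
    · rw [PySem.List.pyRange_neg_one_cons hrange,
          (by ring : (m:Int) + 1 - 1 = (m:Int))]
      have hms : ms ≤ (m : Int) + 1 := by omega
      by_cases hdvd : PySem.Int.mod n ((m : Int) + 1) = 0
      · have hpos : (0:Int) < (m : Int) + 1 := by omega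
        have hdvd' : ((m : Int) + 1) ∣ n := (PySem.Int.mod_eq_zero_iff_dvd n _).1 hdvd
        have hfw : PySem.Int.floordiv n ((m : Int) + 1) = n / ((m : Int) + 1) :=
          PySem.Int.floordiv_eq_ediv_of_pos hpos
        by_cases hw : ms ≤ PySem.Int.floordiv n ((m : Int) + 1)
        · -- h = m+1 is a new (and best) valid divisor
          have hcheck : pvCheckB n ms ((m : Int) + 1)
              = some ((m : Int) + 1, PySem.Int.floordiv n ((m : Int) + 1)) := by
            simp only [pvCheckB]
            rw [if_pos hdvd, if_pos hw]
          simp only [List.findSome?_cons, hcheck]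
          have hhw : (m : Int) + 1 ≤ PySem.Int.floordiv n ((m : Int) + 1) := by
            rw [hfw]; exact (Int.le_ediv_iff_mul_le hpos).2 hm
          have habs : |((m : Int) + 1) - PySem.Int.floordiv n ((m : Int) + 1)|
              = PySem.Int.floordiv n ((m : Int) + 1) - ((m : Int) + 1) := by
            rw [abs_of_nonpos (by omega)]; ring
          have hwn : PySem.Int.floordiv n ((m : Int) + 1) ≤ n := by
            rw [hfw]; exact Int.ediv_le_self _ hn
          have hgaplt : |((m : Int) + 1) - PySem.Int.floordiv n ((m : Int) + 1)| < F.2 := by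
            rw [ih2, habs]
            cases hGm : (PySem.List.pyRange (m : Int) (max ms 1 - 1) (-1)).findSome? (pvCheckB n ms) with
            | none => simp only [pvGapOf]; omega
            | some p =>
              obtain ⟨h0, w0⟩ := p
              obtain ⟨⟨h0one, h0dvd, _, _⟩, hw0, h0le⟩ := ih3 h0 w0 hGm
              have h0pos : (0:Int) < h0 := by omega
              have hfw0 : PySem.Int.floordiv n h0 = n / h0 := PySem.Int.floordiv_eq_ediv_of_pos h0pos
              have hdivle : n / ((m : Int) + 1) ≤ n / h0 := by
                have e1 : h0 * (n / h0) = n := Int.mul_ediv_cancel' h0dvd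
                have e2 : ((m : Int) + 1) * (n / ((m : Int) + 1)) = n := Int.mul_ediv_cancel' hdvd'
                have hq : (0:Int) ≤ n / ((m : Int) + 1) := Int.ediv_nonneg hn (le_of_lt hpos)
                nlinarith
              have hsub : w0 - h0 ≤ |h0 - w0| := by
                have := neg_abs_le (h0 - w0); omega
              simp only [pvGapOf]
              rw [hfw, hw0, hfw0] at *
              omega
          have hnotor : ¬ ((m : Int) + 1 < ms ∨ PySem.Int.floordiv n ((m : Int) + 1) < ms) := by
            rintro (hlt | hlt)
            · omega
            · exact absurd hw (not_le.mpr hlt)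
          have hstep : pvStepA n ms F ((m : Int) + 1)
              = (some ((m : Int) + 1, PySem.Int.floordiv n ((m : Int) + 1)),
                 |((m : Int) + 1) - PySem.Int.floordiv n ((m : Int) + 1)|) := by
            simp only [pvStepA]
            rw [if_neg (not_not_intro hdvd), if_neg hnotor, if_pos hgaplt]
          rw [hstep]
          refine ⟨rfl, rfl, ?_, by simp⟩
          intro h' w' heq
          injection heq with hh
          injection hh with e1 e2
          subst e1
          subst e2
          exact ⟨⟨by omega, hdvd', hms, hw⟩, rfl, le_refl _⟩
        · -- divisor but co-factor too small: both sides skip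
          have hcheck : pvCheckB n ms ((m : Int) + 1) = none := by
            simp only [pvCheckB]
            rw [if_pos hdvd, if_neg hw]
          simp only [List.findSome?_cons, hcheck]
          have hstep : pvStepA n ms F ((m : Int) + 1) = F := by
            simp only [pvStepA]
            rw [if_neg (not_not_intro hdvd), if_pos (Or.inr (not_le.mp hw))]
          rw [hstep]
          refine ⟨ih1, ih2, ?_, ?_⟩
          · intro h' w' heq
            obtain ⟨hv, hweq, hle⟩ := ih3 h' w' heq
            exact ⟨hv, hweq, by omega⟩
          · intro hnone h' hv hle
            rcases (by omega : h' ≤ (m : Int) ∨ h' = (m : Int) + 1) with hc | rfl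
            · exact ih4 hnone h' hv hc
            · exact hw hv.2.2.2
      · -- not a divisor: both sides skip
        have hcheck : pvCheckB n ms ((m : Int) + 1) = none := by
          simp only [pvCheckB]
          rw [if_neg hdvd]
        simp only [List.findSome?_cons, hcheck]
        have hstep : pvStepA n ms F ((m : Int) + 1) = F := by
          simp only [pvStepA]
          rw [if_pos hdvd]
        rw [hstep]
        refine ⟨ih1, ih2, ?_, ?_⟩
        · intro h' w' heq
          obtain ⟨hv, hweq, hle⟩ := ih3 h' w' heq
          exact ⟨hv, hweq, by omega⟩
        · intro hnone h' hv hle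
          rcases (by omega : h' ≤ (m : Int) ∨ h' = (m : Int) + 1) with hc | rfl
          · exact ih4 hnone h' hv hc
          · exact hdvd ((PySem.Int.mod_eq_zero_iff_dvd n _).2 hv.2.1)
    · -- m+1 is still below B's lower bound: h = m+1 < min_side, both sides skip
      have e1 : PySem.List.pyRange ((m : Int) + 1) (max ms 1 - 1) (-1) = [] :=
        PySem.List.pyRange_neg_one_eq_nil (by omega)
      have e2 : PySem.List.pyRange (m : Int) (max ms 1 - 1) (-1) = [] :=
        PySem.List.pyRange_neg_one_eq_nil (by omega)
      rw [e1]
      rw [e2] at ih1 ih2 ih4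
      have hlt : ((m : Int) + 1) < ms := by omega
      have hstep : pvStepA n ms F ((m : Int) + 1) = F := by
        by_cases hdvd : PySem.Int.mod n ((m : Int) + 1) = 0
        · simp only [pvStepA]
          rw [if_neg (not_not_intro hdvd), if_pos (Or.inl hlt)]
        · simp only [pvStepA]
          rw [if_pos hdvd]
      rw [hstep]
      refine ⟨by simpa using ih1, by simpa using ih2, by simp, ?_⟩
      intro _ h' hv hle
      have : ms ≤ h' := hv.2.2.1
      omega

-- ===== VERDICT (by name: the statement is the Claim_ definition above) =====
theorem infer_rect_hw_py_spec : Claim_equal_infer_rect_hw_py := by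
  intro nf ms hdom hpre
  unfold Spec_infer_rect_hw_py infer_rect_hw_py infer_rect_hw_py_alt
  have hbig : nf ≤ 2147483648 := by
    unfold Dom_infer_rect_hw_py pvDomInt at hdom
    simp only [Bool.and_eq_true, decide_eq_true_eq] at hdom
    exact hdom.1.2
  have hm : ((Nat.sqrt nf.toNat : Nat) : Int) * ((Nat.sqrt nf.toNat : Nat) : Int) ≤ nf := by
    have h0 : Nat.sqrt nf.toNat * Nat.sqrt nf.toNat ≤ nf.toNat := by
      simpa [pow_two] using Nat.sqrt_le' nf.toNat
    have h2 : ((Nat.sqrt nf.toNat * Nat.sqrt nf.toNat : Nat) : Int) ≤ ((nf.toNat : Nat) : Int) := by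
      exact_mod_cast h0
    push_cast at h2
    rwa [Int.toNat_of_nonneg hpre] at h2
  exact (pvMain nf ms hpre hbig (Nat.sqrt nf.toNat) hm).1
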